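-- pv_equiv track=rewrite | github.com/Krandheer/data-structure | rec1.py | ways_to_climb_stairs2
-- ===== SOURCE A (Python) =====
-- def ways_to_climb_stairs2(p, target):
--     if target == 0:
--         ans = [p]
--         return ans
--
--     ans1 = ways_to_climb_stairs2(p + str(1), target - 1)
--     ans2 = []
--     ans3 = []
--     if target >= 2:
--         ans2 = ways_to_climb_stairs2(p + str(2), target - 2)
--
--     if target >= 3:
--         ans3 = ways_to_climb_stairs2(p + str(3), target - 3)
--     result = ans1 + ans2 + ans3
--     return result
-- ===== SOURCE B (Python) =====
-- def ways_to_climb_stairs2(p, target):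
--     # Bottom-up DP with a sliding window of the last three subtarget tables,
--     # instead of A's ternary top-down recursion.
--     a, b, c = [], [], [""]
--     for _ in range(target):
--         a, b, c = b, c, (["1" + s for s in c]
--                          + ["2" + s for s in b]
--                          + ["3" + s for s in a])
--     return [p + s for s in c]
-- ===== Notes on version B (the rewrite author's own statement) =====
-- stated objective: alternative
-- what changed: Replaces A's ternary top-down recursion (which rebuilds each prefix string along every branch) by an iterative bottom-up DP that keeps a sliding window of the last three subtarget tables and prepends the prefix once at the end.
import Mathlib
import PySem

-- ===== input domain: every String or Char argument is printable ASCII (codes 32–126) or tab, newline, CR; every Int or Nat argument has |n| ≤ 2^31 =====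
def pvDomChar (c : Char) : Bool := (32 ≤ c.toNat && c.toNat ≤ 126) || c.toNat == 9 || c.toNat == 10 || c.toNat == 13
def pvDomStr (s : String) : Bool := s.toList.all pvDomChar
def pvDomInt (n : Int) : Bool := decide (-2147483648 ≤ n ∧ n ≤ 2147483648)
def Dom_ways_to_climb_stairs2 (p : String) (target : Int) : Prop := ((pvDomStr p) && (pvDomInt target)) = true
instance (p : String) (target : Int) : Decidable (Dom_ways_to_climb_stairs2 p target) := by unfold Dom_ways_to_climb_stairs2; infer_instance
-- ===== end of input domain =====

-- B replaces A's ternary top-down recursion by a bottom-up sliding-window DP (same return value on target ≥ 0).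

-- ===== PORT A =====
-- A recurses on `target`; on target ≥ 0 (= Pre_) the recursion is exactly the one below on
-- target.toNat (Python's target-1/2/3 equals the Nat subtraction under the guards).
def waysA (p : String) (n : Nat) : List String :=
  if n = 0 then [p]
  else
    let ans1 := waysA (p ++ PySem.Int.toStr 1) (n - 1)
    let ans2 := if 2 ≤ n then waysA (p ++ PySem.Int.toStr 2) (n - 2) else []
    let ans3 := if 3 ≤ n then waysA (p ++ PySem.Int.toStr 3) (n - 3) else []
    ans1 ++ ans2 ++ ans3
termination_by n
decreasing_by all_goals omega

def ways_to_climb_stairs2 (p : String) (target : Int) : List String :=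
  waysA p target.toNat

-- ===== PORT B =====
-- one loop iteration of Source B: (a, b, c) ← (b, c, ["1"+s…] + ["2"+s…] + ["3"+s…])
def stepB (abc : List String × List String × List String) :
    List String × List String × List String :=
  let (a, b, c) := abc
  (b, c, c.map (fun s => "1" ++ s) ++ b.map (fun s => "2" ++ s) ++ a.map (fun s => "3" ++ s))

def ways_to_climb_stairs2_alt (p : String) (target : Int) : List String :=
  -- `for _ in range(target)`: target.toNat iterations, loop variable unused — exact
  let st := (List.range target.toNat).foldl (fun abc _ => stepB abc) ([], [], [""])
  st.2.2.map (fun s => p ++ s)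

-- ===== PRECONDITION & SPEC =====
-- Pre_ excludes target < 0, where Python A recurses forever (RecursionError); it returns on all target ≥ 0.
def Pre_ways_to_climb_stairs2 (p : String) (target : Int) : Prop := 0 ≤ target
instance (p : String) (target : Int) : Decidable (Pre_ways_to_climb_stairs2 p target) := by unfold Pre_ways_to_climb_stairs2; infer_instance
def pvWitness_ways_to_climb_stairs2 : String × Int := ("", 3)

def Spec_ways_to_climb_stairs2 (p : String) (target : Int) (out : List String) : Prop := out = ways_to_climb_stairs2_alt p target
instance (p : String) (target : Int) (out : List String) : Decidable (Spec_ways_to_climb_stairs2 p target out) := by unfold Spec_ways_to_climb_stairs2; infer_instance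

-- ===== CLAIM (what is proved, stated in full; the proofs are below) =====
def Claim_equal_ways_to_climb_stairs2 : Prop := ∀ (p : String) (target : Int), Dom_ways_to_climb_stairs2 p target → Pre_ways_to_climb_stairs2 p target → Spec_ways_to_climb_stairs2 p target (ways_to_climb_stairs2 p target)

-- ===== LEMMAS AND PROOFS =====

-- the sequence of suffix tables: wseq n = all step strings summing to n, in A's branch order
def wseq : Nat → List String
  | 0 => [""]
  | (n+1) =>
      (wseq n).map (fun s => "1" ++ s)
        ++ (if 1 ≤ n then (wseq (n-1)).map (fun s => "2" ++ s) else [])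
        ++ (if 2 ≤ n then (wseq (n-2)).map (fun s => "3" ++ s) else [])
termination_by n => n
decreasing_by all_goals omega

lemma waysA_eq : ∀ (n : Nat) (p : String), waysA p n = (wseq n).map (fun s => p ++ s) := by
  intro n
  induction n using Nat.strong_induction_on with
  | _ n ih =>
    intro p
    match n with
    | 0 => simp [waysA, wseq]
    | Nat.succ m =>
      rw [waysA, wseq]
      simp only [Nat.succ_ne_zero, if_false]
      rw [show (m.succ - 1 : Nat) = m from rfl, show (m.succ - 2 : Nat) = m - 1 from rfl,
          show (m.succ - 3 : Nat) = m - 2 from rfl]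
      simp only [show (2 ≤ m.succ) ↔ (1 ≤ m) from by omega,
                 show (3 ≤ m.succ) ↔ (2 ≤ m) from by omega]
      rw [ih m (by omega), ih (m-1) (by omega), ih (m-2) (by omega),
          show PySem.Int.toStr 1 = "1" from rfl, show PySem.Int.toStr 2 = "2" from rfl,
          show PySem.Int.toStr 3 = "3" from rfl]
      split_ifs <;> simp [List.map_map, Function.comp_def, String.append_assoc]

def prev1 (k : Nat) : List String := if 1 ≤ k then wseq (k-1) else []
def prev2 (k : Nat) : List String := if 2 ≤ k then wseq (k-2) else []

lemma foldB_eq (n : Nat) :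
    (List.range n).foldl (fun abc _ => stepB abc) ([], [], [""]) =
      (prev2 n, prev1 n, wseq n) := by
  induction n with
  | zero => simp [prev1, prev2, wseq]
  | succ k ih =>
    rw [List.range_succ, List.foldl_append, ih]
    simp only [List.foldl_cons, List.foldl_nil, stepB]
    refine Prod.ext ?_ (Prod.ext ?_ ?_)
    · simp only [prev1, prev2]
      split_ifs <;> simp_all
    · simp [prev1]
    · show _ = wseq (k+1)
      rw [wseq]
      simp only [prev1, prev2]
      split_ifs <;> simp

theorem ways_to_climb_stairs2_spec : Claim_equal_ways_to_climb_stairs2 := by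
  unfold Claim_equal_ways_to_climb_stairs2
  intro p target _ _
  unfold Spec_ways_to_climb_stairs2 ways_to_climb_stairs2 ways_to_climb_stairs2_alt
  rw [foldB_eq, waysA_eq]
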